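-- pv_equiv track=rewrite | github.com/YihanWangAstro/VegasAfterglow | validation/visualization/common.py | get_unique_short_names
-- ===== SOURCE A (Python) =====
-- from typing import Dict, List, Optional, Tuple, Union
--
-- def get_unique_short_names(names: List[str], max_len: int = 6) -> Dict[str, str]:
--     short = {}
--     for name in names:
--         for length in range(3, len(name) + 1):
--             prefix = name[:length]
--             if prefix not in [short.get(n, "")[:length] for n in names if n != name]:
--                 short[name] = prefix[:max_len]
--                 break
--         else:
--             short[name] = name[:max_len]
--     return short
-- ===== SOURCE B (Python) =====
-- def get_unique_short_names(names, max_len=6):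
--     short = {}
--     prefixes = {}  # nonempty prefix of an assigned short -> how many assigned names' shorts start with it
--     for name in names:
--         if name in short:
--             # un-count the prefixes of this name's previous short before re-assigning
--             p = ""
--             for ch in short[name]:
--                 p += ch
--                 c = prefixes.get(p, 0) - 1
--                 if c > 0:
--                     prefixes[p] = c
--                 else:
--                     prefixes.pop(p, None)
--         chosen = None
--         for length in range(3, len(name) + 1):
--             if name[:length] not in prefixes:
--                 chosen = name[:length][:max_len]
--                 break
--         if chosen is None:
--             chosen = name[:max_len]
--         short[name] = chosen
--         p = ""
--         for ch in chosen:
--             p += ch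
--             prefixes[p] = prefixes.get(p, 0) + 1
--     return short
-- ===== Notes on version B (the rewrite author's own statement) =====
-- stated objective: faster
-- what changed: Instead of rebuilding, for every candidate length, the list of all other names' assigned shorts truncated to that length, B maintains one incrementally updated counter of the nonempty prefixes of the assigned shorts, so each candidate prefix is a single dictionary lookup.
import Mathlib
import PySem

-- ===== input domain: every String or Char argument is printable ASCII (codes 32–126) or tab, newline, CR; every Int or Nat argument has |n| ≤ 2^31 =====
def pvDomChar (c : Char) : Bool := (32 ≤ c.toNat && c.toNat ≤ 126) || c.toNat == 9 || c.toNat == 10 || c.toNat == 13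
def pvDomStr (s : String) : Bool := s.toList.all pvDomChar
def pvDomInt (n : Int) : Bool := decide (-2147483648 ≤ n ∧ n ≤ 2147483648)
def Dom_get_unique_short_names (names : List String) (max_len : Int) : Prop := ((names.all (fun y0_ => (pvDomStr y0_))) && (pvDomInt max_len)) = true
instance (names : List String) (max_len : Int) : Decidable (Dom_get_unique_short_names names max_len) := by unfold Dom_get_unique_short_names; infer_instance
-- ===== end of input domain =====

-- B replaces A's per-candidate rescan of all names (slicing every assigned short each time) by an
-- incrementally maintained counter of the nonempty prefixes of the assigned shorts, so each candidate
-- prefix is a single dictionary lookup (objective: faster; measured).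

-- ===== PORT A =====
-- inner 'for length in range(3, len(name)+1): … else: …' loop of A
def gusnLoopA (names : List String) (max_len : Int) (shortD : PySem.Dict String String)
    (name : String) : List Int → PySem.Dict String String
  | [] => shortD.insert name (PySem.Str.slice name none (some max_len))
  | length :: rest =>
    let pre := PySem.Str.slice name none (some length)
    if ((names.filter (fun n => n != name)).map
          (fun n => PySem.Str.slice (shortD.getD n "") none (some length))).contains pre = false then
      shortD.insert name (PySem.Str.slice pre none (some max_len))
    else
      gusnLoopA names max_len shortD name rest

def get_unique_short_names (names : List String) (max_len : Int) : List (String × String) :=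
  (names.foldl
    (fun shortD name =>
      gusnLoopA names max_len shortD name (PySem.List.pyRange 3 (PySem.Str.len name + 1) 1))
    (PySem.Dict.mk [])).items

-- ===== PORT B =====
-- 'p += ch; c = prefixes.get(p,0)-1; if c>0: prefixes[p]=c else: prefixes.pop(p,None)' over old short
def gusnRemove (p : List Char) (rest : List Char) (pfx : PySem.Dict String Int) :
    PySem.Dict String Int :=
  match rest with
  | [] => pfx
  | ch :: rest =>
    let p' := p ++ [ch]
    let c := pfx.getD (String.ofList p') 0 - 1
    if 0 < c then gusnRemove p' rest (pfx.insert (String.ofList p') c)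
    else gusnRemove p' rest (pfx.erase (String.ofList p'))

-- 'p += ch; prefixes[p] = prefixes.get(p,0)+1' over the chosen short
def gusnAdd (p : List Char) (rest : List Char) (pfx : PySem.Dict String Int) :
    PySem.Dict String Int :=
  match rest with
  | [] => pfx
  | ch :: rest =>
    let p' := p ++ [ch]
    gusnAdd p' rest (pfx.insert (String.ofList p') (pfx.getD (String.ofList p') 0 + 1))

-- 'for length in range(3, len(name)+1): if name[:length] not in prefixes: chosen = …; break'
def gusnFind (pfx : PySem.Dict String Int) (name : String) (max_len : Int) : List Int → Option String
  | [] => none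
  | length :: rest =>
    if pfx.contains (PySem.Str.slice name none (some length)) = false then
      some (PySem.Str.slice (PySem.Str.slice name none (some length)) none (some max_len))
    else
      gusnFind pfx name max_len rest

-- one iteration of B's main loop over (short, prefixes)
def gusnStep (max_len : Int) (st : PySem.Dict String String × PySem.Dict String Int)
    (name : String) : PySem.Dict String String × PySem.Dict String Int :=
  let pfx := if st.1.contains name then gusnRemove [] (st.1.getD name "").toList st.2 else st.2
  let chosen :=
    match gusnFind pfx name max_len (PySem.List.pyRange 3 (PySem.Str.len name + 1) 1) with
    | some c => c
    | none => PySem.Str.slice name none (some max_len)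
  (st.1.insert name chosen, gusnAdd [] chosen.toList pfx)

def get_unique_short_names_alt (names : List String) (max_len : Int) : List (String × String) :=
  (names.foldl (gusnStep max_len) (PySem.Dict.mk [], PySem.Dict.mk [])).1.items

-- ===== PRECONDITION & SPEC =====
def Spec_get_unique_short_names (names : List String) (max_len : Int) (out : List (String × String)) : Prop := out = get_unique_short_names_alt names max_len
instance (names : List String) (max_len : Int) (out : List (String × String)) : Decidable (Spec_get_unique_short_names names max_len out) := by unfold Spec_get_unique_short_names; infer_instance

-- ===== CLAIM (what is proved, stated in full; the proofs are below) =====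
def Claim_equal_get_unique_short_names : Prop := ∀ (names : List String) (max_len : Int), Dom_get_unique_short_names names max_len → Spec_get_unique_short_names names max_len (get_unique_short_names names max_len)

-- ===== LEMMAS AND PROOFS =====

-- how many assigned shorts have q as a prefix
def gusnCnt (d : PySem.Dict String String) (q : List Char) : Nat :=
  d.items.countP (fun kv => decide (q <+: kv.2.toList))

-- the counter value B stores for a count (absent = 0)
def gusnEnc (n : Nat) : Option Int := if n = 0 then none else some (n : Int)

-- B's counter is exact for the short dict d
def gusnInv (d : PySem.Dict String String) (pfx : PySem.Dict String Int) : Prop :=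
  ∀ q : List Char, q ≠ [] → pfx.get? (String.ofList q) = gusnEnc (gusnCnt d q)

-- small Dict facts not in the prelude (erase-specific)
theorem gusn_get?_erase_self {ν : Type} (d : PySem.Dict String ν) (k : String) :
    (d.erase k).get? k = none := by
  simp only [PySem.Dict.get?, PySem.Dict.erase, Option.map_eq_none_iff, List.find?_eq_none]
  intro p hp
  simp only [List.mem_filter] at hp
  simpa using hp.2

theorem gusn_get?_erase_of_ne {ν : Type} (d : PySem.Dict String ν) {k k' : String} (h : k' ≠ k) :
    (d.erase k).get? k' = d.get? k' := by
  simp only [PySem.Dict.get?, PySem.Dict.erase]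
  congr 1
  induction d.items with
  | nil => rfl
  | cons p tl ih =>
    by_cases hpk : p.1 = k
    · have h1 : (p.1 == k') = false := by simp [hpk, Ne.symm h]
      have h2 : (k == k') = false := by simp [Ne.symm h]
      simp [hpk, h2, ih]
    · by_cases hpk' : p.1 = k'
      · simp [hpk', h]
      · simp [hpk, hpk', ih]

theorem gusn_items_erase_of_not_contains {ν : Type} (d : PySem.Dict String ν) {k : String}
    (h : d.contains k = false) : (d.erase k).items = d.items := by
  simp only [PySem.Dict.contains, List.any_eq_false] at h
  simp only [PySem.Dict.erase]
  exact List.filter_eq_self.mpr (fun p hp => by simpa using h p hp)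


theorem gusn_nodup_keys_insert {ν : Type} (d : PySem.Dict String ν) (k : String) (v : ν)
    (h : d.keys.Nodup) : (d.insert k v).keys.Nodup := by
  by_cases hc : d.contains k
  · rw [PySem.Dict.keys_insert_of_contains d v hc]; exact h
  · rw [PySem.Dict.keys_insert_of_not_contains d v (by simpa using hc)]
    have hk : k ∉ d.keys := by
      intro hk
      exact absurd ((PySem.Dict.contains_iff_mem_keys d k).mpr hk) (by simpa using hc)
    refine List.Nodup.append h (List.nodup_singleton k) ?_
    simpa [List.disjoint_singleton] using hk

-- counting across insert: the new pair replaces whatever had key k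
theorem gusn_countP_replace {ν : Type} (k : String) (v : ν) (P : String × ν → Bool) :
    ∀ l : List (String × ν), (l.map Prod.fst).Nodup → l.any (fun p => p.1 == k) = true →
    (l.map (fun p => if p.1 == k then (k, v) else p)).countP P
      = (l.filter (fun p => !(p.1 == k))).countP P + (if P (k, v) then 1 else 0) := by
  intro l
  induction l with
  | nil => intro _ h; simp at h
  | cons p tl ih =>
    intro hnd hany
    simp only [List.map_cons, List.nodup_cons] at hnd
    by_cases hpk : p.1 = k
    · have htl : ∀ q ∈ tl, (if q.1 == k then (k, v) else q) = q := by
        intro q hq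
        have : ¬ q.1 = k := fun hqk => hnd.1 (hpk ▸ hqk ▸ List.mem_map_of_mem hq)
        simp [this]
      have hmap : tl.map (fun p => if p.1 == k then (k, v) else p) = tl :=
        (List.map_congr_left htl).trans (List.map_id tl)
      have hfil : tl.filter (fun p => !(p.1 == k)) = tl := by
        apply List.filter_eq_self.mpr
        intro q hq
        have : ¬ q.1 = k := fun hqk => hnd.1 (hpk ▸ hqk ▸ List.mem_map_of_mem hq)
        simp [this]
      have hcons : (p :: tl).map (fun p => if p.1 == k then (k, v) else p) = (k, v) :: tl := by
        rw [List.map_cons, hmap]; simp [hpk]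
      have hfcons : (p :: tl).filter (fun p => !(p.1 == k)) = tl := by
        rw [List.filter_cons]; simp [hpk, hfil]
      rw [hcons, hfcons, List.countP_cons]
    · have hany' : tl.any (fun p => p.1 == k) = true := by
        simp only [List.any_cons] at hany
        rcases Bool.or_eq_true_iff.mp hany with h | h
        · exact absurd (by simpa using h) hpk
        · exact h
      have hcons : (p :: tl).map (fun p => if p.1 == k then (k, v) else p)
          = p :: tl.map (fun p => if p.1 == k then (k, v) else p) := by
        rw [List.map_cons]; simp [hpk]
      have hfcons : (p :: tl).filter (fun p => !(p.1 == k))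
          = p :: tl.filter (fun p => !(p.1 == k)) := by
        rw [List.filter_cons]; simp [hpk]
      rw [hcons, List.countP_cons, ih hnd.2 hany', hfcons, List.countP_cons]
      omega

theorem gusn_countP_insert {ν : Type} (d : PySem.Dict String ν) (k : String) (v : ν)
    (P : String × ν → Bool) (hnd : d.keys.Nodup) :
    (d.insert k v).items.countP P
      = (d.erase k).items.countP P + (if P (k, v) then 1 else 0) := by
  by_cases hc : d.contains k
  · rw [PySem.Dict.items_insert_of_contains d v hc]
    simp only [PySem.Dict.erase]
    exact gusn_countP_replace k v P d.items (by simpa [PySem.Dict.keys] using hnd)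
      (by simpa [PySem.Dict.contains] using hc)
  · rw [PySem.Dict.items_insert_of_not_contains d v (by simpa using hc)]
    rw [List.countP_append, gusn_items_erase_of_not_contains d (by simpa using hc)]
    simp [List.countP_cons]

-- counting across erase of a present key
theorem gusn_countP_erase_aux {ν : Type} (k : String) (v : ν) (P : String × ν → Bool) :
    ∀ l : List (String × ν), (l.map Prod.fst).Nodup →
    Option.map (fun x : String × ν => x.2) (l.find? (fun p => p.1 == k)) = some v →
    l.countP P = (l.filter (fun p => !(p.1 == k))).countP P + (if P (k, v) then 1 else 0) := by
  intro l
  induction l with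
  | nil => intro _ h; simp at h
  | cons p tl ih =>
    intro hnd hfind
    simp only [List.map_cons, List.nodup_cons] at hnd
    by_cases hpk : p.1 = k
    · have hp : p = (k, v) := by
        rw [List.find?_cons_of_pos (by simp [hpk])] at hfind
        simp only [Option.map_some, Option.some.injEq] at hfind
        exact Prod.ext hpk hfind
      have hfil : tl.filter (fun p => !(p.1 == k)) = tl := by
        apply List.filter_eq_self.mpr
        intro q hq
        have : ¬ q.1 = k := fun hqk => hnd.1 (hpk ▸ hqk ▸ List.mem_map_of_mem hq)
        simp [this]
      have hfcons : (p :: tl).filter (fun p => !(p.1 == k)) = tl := by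
        rw [List.filter_cons]; simp [hpk, hfil]
      rw [List.countP_cons, hfcons, hp]
    · rw [List.find?_cons_of_neg (by simp [hpk])] at hfind
      have hfcons : (p :: tl).filter (fun p => !(p.1 == k))
          = p :: tl.filter (fun p => !(p.1 == k)) := by
        rw [List.filter_cons]; simp [hpk]
      rw [List.countP_cons, ih hnd.2 hfind, hfcons, List.countP_cons]
      omega

theorem gusn_countP_erase {ν : Type} (d : PySem.Dict String ν) (k : String) (v : ν)
    (P : String × ν → Bool) (hnd : d.keys.Nodup) (hv : d.get? k = some v) :
    d.items.countP P = (d.erase k).items.countP P + (if P (k, v) then 1 else 0) := by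
  simp only [PySem.Dict.erase]
  exact gusn_countP_erase_aux k v P d.items (by simpa [PySem.Dict.keys] using hnd)
    (by simpa [PySem.Dict.get?] using hv)

-- B's removal loop decrements exactly the counters of the proper extensions of p that prefix p++rest
theorem gusn_ofList_ne {p q : List Char} (h : p ≠ q) : String.ofList p ≠ String.ofList q := by
  intro he
  exact h (by have := congrArg String.toList he; simpa using this)

theorem gusn_prefix_asym {p q : List Char} (h1 : p <+: q) (h2 : q <+: p) : q = p := by
  obtain ⟨t, rfl⟩ := h1
  have hl := h2.length_le
  rw [List.length_append] at hl
  have : t = [] := List.eq_nil_of_length_eq_zero (by omega)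
  subst this
  simp

theorem gusn_ind_shift {p q : List Char} {ch : Char} {rest : List Char} (hq : q ≠ p ++ [ch]) :
    (p <+: q ∧ q <+: p ++ ch :: rest ∧ q ≠ p)
      ↔ ((p ++ [ch]) <+: q ∧ q <+: (p ++ [ch]) ++ rest ∧ q ≠ p ++ [ch]) := by
  constructor
  · rintro ⟨⟨t, rfl⟩, h2, h3⟩
    have ht : t ≠ [] := fun h => h3 (by simp [h])
    have h2' : t <+: ch :: rest := (List.prefix_append_right_inj p).mp h2
    obtain ⟨a, t', rfl⟩ := List.exists_cons_of_ne_nil ht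
    obtain ⟨ha, ht'⟩ := List.cons_prefix_cons.mp h2'
    subst ha
    refine ⟨⟨t', by simp⟩, ?_, hq⟩
    rw [show p ++ a :: t' = (p ++ [a]) ++ t' by simp]
    exact (List.prefix_append_right_inj _).mpr ht'
  · rintro ⟨h1, h2, h3⟩
    refine ⟨(List.prefix_append p [ch]).trans h1, ?_, ?_⟩
    · simpa [List.append_assoc] using h2
    · rintro rfl
      have := h1.length_le
      simp at this

theorem gusnRemove_spec (rest : List Char) : ∀ (p : List Char) (pfx : PySem.Dict String Int)
    (c : List Char → Nat), (∀ q, q ≠ [] → pfx.get? (String.ofList q) = gusnEnc (c q)) →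
    ∀ q, q ≠ [] → (gusnRemove p rest pfx).get? (String.ofList q)
      = gusnEnc (c q - (if p <+: q ∧ q <+: p ++ rest ∧ q ≠ p then 1 else 0)) := by
  induction rest with
  | nil =>
    intro p pfx c hpfx q hq
    have hind : ¬ (p <+: q ∧ q <+: p ++ [] ∧ q ≠ p) := by
      rintro ⟨h1, h2, h3⟩
      exact h3 (gusn_prefix_asym h1 (by simpa using h2))
    simp only [gusnRemove, if_neg hind]
    simpa using hpfx q hq
  | cons ch rest ih =>
    intro p pfx c hpfx q hq
    have hgd : pfx.getD (String.ofList (p ++ [ch])) 0 = ((c (p ++ [ch]) : Int)) := by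
      have h := hpfx (p ++ [ch]) (by simp)
      simp only [PySem.Dict.getD, h]
      by_cases h0 : c (p ++ [ch]) = 0 <;> simp [gusnEnc, h0]
    simp only [gusnRemove, hgd]
    by_cases hlt : (0 : Int) < (c (p ++ [ch]) : Int) - 1
    · rw [if_pos hlt]
      have hge : 2 ≤ c (p ++ [ch]) := by exact_mod_cast by omega
      have hstep : ∀ r, r ≠ [] →
          (pfx.insert (String.ofList (p ++ [ch])) ((c (p ++ [ch]) : Int) - 1)).get?
              (String.ofList r)
            = gusnEnc ((fun r => if r = p ++ [ch] then c (p ++ [ch]) - 1 else c r) r) := by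
        intro r hr
        by_cases hrp : r = p ++ [ch]
        · subst hrp
          rw [PySem.Dict.get?_insert_self]
          have : ((c (p ++ [ch]) : Int) - 1) = ((c (p ++ [ch]) - 1 : Nat) : Int) := by
            omega
          simp [gusnEnc, this]
          omega
        · rw [PySem.Dict.get?_insert_of_ne _ _ (gusn_ofList_ne hrp)]
          simp [hpfx r hr, hrp]
      have := ih (p ++ [ch]) _ _ hstep q hq
      rw [this]
      by_cases hq' : q = p ++ [ch]
      · subst hq'
        have hind1 : (p <+: p ++ [ch] ∧ p ++ [ch] <+: p ++ ch :: rest ∧ p ++ [ch] ≠ p) := by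
          refine ⟨List.prefix_append p [ch], ?_, by simp⟩
          rw [show p ++ ch :: rest = (p ++ [ch]) ++ rest by simp]
          exact List.prefix_append _ _
        rw [if_pos hind1]
        have hind2 : ¬ ((p ++ [ch]) <+: p ++ [ch] ∧ p ++ [ch] <+: (p ++ [ch]) ++ rest
            ∧ p ++ [ch] ≠ p ++ [ch]) := by rintro ⟨_, _, h⟩; exact h rfl
        rw [if_neg hind2]
        simp
      · rw [if_congr (Iff.symm (gusn_ind_shift hq')) rfl rfl]
        simp [hq']
    · rw [if_neg hlt]
      have hle : c (p ++ [ch]) ≤ 1 := by exact_mod_cast by omega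
      have hstep : ∀ r, r ≠ [] →
          (pfx.erase (String.ofList (p ++ [ch]))).get? (String.ofList r)
            = gusnEnc ((fun r => if r = p ++ [ch] then 0 else c r) r) := by
        intro r hr
        by_cases hrp : r = p ++ [ch]
        · subst hrp
          rw [gusn_get?_erase_self]
          simp [gusnEnc]
        · rw [gusn_get?_erase_of_ne _ (gusn_ofList_ne hrp)]
          simp [hpfx r hr, hrp]
      have := ih (p ++ [ch]) _ _ hstep q hq
      rw [this]
      by_cases hq' : q = p ++ [ch]
      · subst hq'
        simp only [if_neg (by rintro ⟨_, _, h⟩; exact h rfl : ¬ ((p ++ [ch]) <+: p ++ [ch]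
            ∧ p ++ [ch] <+: (p ++ [ch]) ++ rest ∧ p ++ [ch] ≠ p ++ [ch]))]
        have : c (p ++ [ch]) - 1 = 0 := by omega
        by_cases hi : (p <+: p ++ [ch] ∧ p ++ [ch] <+: p ++ ch :: rest ∧ p ++ [ch] ≠ p) <;>
          simp [hi, gusnEnc, this]
      · rw [if_congr (Iff.symm (gusn_ind_shift hq')) rfl rfl]
        simp [hq']

-- B's addition loop increments exactly those counters
theorem gusnAdd_spec (rest : List Char) : ∀ (p : List Char) (pfx : PySem.Dict String Int)
    (c : List Char → Nat), (∀ q, q ≠ [] → pfx.get? (String.ofList q) = gusnEnc (c q)) →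
    ∀ q, q ≠ [] → (gusnAdd p rest pfx).get? (String.ofList q)
      = gusnEnc (c q + (if p <+: q ∧ q <+: p ++ rest ∧ q ≠ p then 1 else 0)) := by
  induction rest with
  | nil =>
    intro p pfx c hpfx q hq
    have hind : ¬ (p <+: q ∧ q <+: p ++ [] ∧ q ≠ p) := by
      rintro ⟨h1, h2, h3⟩
      exact h3 (gusn_prefix_asym h1 (by simpa using h2))
    simp only [gusnAdd, if_neg hind]
    simpa using hpfx q hq
  | cons ch rest ih =>
    intro p pfx c hpfx q hq
    have hgd : pfx.getD (String.ofList (p ++ [ch])) 0 = ((c (p ++ [ch]) : Int)) := by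
      have h := hpfx (p ++ [ch]) (by simp)
      simp only [PySem.Dict.getD, h]
      by_cases h0 : c (p ++ [ch]) = 0 <;> simp [gusnEnc, h0]
    simp only [gusnAdd, hgd]
    have hstep : ∀ r, r ≠ [] →
        (pfx.insert (String.ofList (p ++ [ch])) ((c (p ++ [ch]) : Int) + 1)).get?
            (String.ofList r)
          = gusnEnc ((fun r => if r = p ++ [ch] then c (p ++ [ch]) + 1 else c r) r) := by
      intro r hr
      by_cases hrp : r = p ++ [ch]
      · subst hrp
        rw [PySem.Dict.get?_insert_self]
        rw [show ((c (p ++ [ch]) : Int) + 1) = ((c (p ++ [ch]) + 1 : Nat) : Int) by omega]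
        simp [gusnEnc]
      · rw [PySem.Dict.get?_insert_of_ne _ _ (gusn_ofList_ne hrp)]
        simp [hpfx r hr, hrp]
    have := ih (p ++ [ch]) _ _ hstep q hq
    rw [this]
    by_cases hq' : q = p ++ [ch]
    · subst hq'
      have hind1 : (p <+: p ++ [ch] ∧ p ++ [ch] <+: p ++ ch :: rest ∧ p ++ [ch] ≠ p) := by
        refine ⟨List.prefix_append p [ch], ?_, by simp⟩
        rw [show p ++ ch :: rest = (p ++ [ch]) ++ rest by simp]
        exact List.prefix_append _ _
      rw [if_pos hind1]
      have hind2 : ¬ ((p ++ [ch]) <+: p ++ [ch] ∧ p ++ [ch] <+: (p ++ [ch]) ++ rest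
          ∧ p ++ [ch] ≠ p ++ [ch]) := by rintro ⟨_, _, h⟩; exact h rfl
      rw [if_neg hind2]
      simp
    · rw [if_congr (Iff.symm (gusn_ind_shift hq')) rfl rfl]
      simp [hq']

-- a slice to a length the candidate also has equals the candidate iff the candidate is a prefix
theorem gusn_take_eq_iff {v p : List Char} {L : Nat} (hp : p.length = L) :
    (v.take L = p) ↔ p <+: v := by
  constructor
  · intro h
    rw [← h]
    exact List.take_prefix _ _
  · intro h
    have := List.prefix_iff_eq_take.mp h
    rw [hp] at this
    exact this.symm

-- A's membership test over all names equals positivity of B's count over the dict without `name`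
theorem gusn_contains_iff_get? {ν : Type} (d : PySem.Dict String ν) (k : String) :
    d.contains k = true ↔ d.get? k ≠ none := by
  rw [PySem.Dict.contains_iff_mem_keys, ne_eq, PySem.Dict.get?_eq_none_iff_not_mem_keys, not_not]

theorem gusn_test_eq (names : List String) (d : PySem.Dict String String)
    (pfx' : PySem.Dict String Int) (name : String) (length : Int)
    (h3 : 3 ≤ length) (hle : length ≤ (name.toList.length : Int))
    (hnd : d.keys.Nodup) (hkeys : ∀ kv ∈ d.items, kv.1 ∈ names)
    (hinv : gusnInv (d.erase name) pfx') :
    ((names.filter (fun n => n != name)).map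
        (fun n => PySem.Str.slice (d.getD n "") none (some length))).contains
      (PySem.Str.slice name none (some length))
    = pfx'.contains (PySem.Str.slice name none (some length)) := by
  have h0L : (0 : Int) ≤ length := by omega
  set pre := PySem.Str.slice name none (some length) with hpre
  have hpreL : pre.toList = name.toList.take length.toNat := by
    rw [hpre, PySem.Str.toList_slice, PySem.Chars.slice_eq_listSlice, PySem.List.slice_to _ h0L]
  have hlenN : length.toNat ≤ name.toList.length := by omega
  have hplen : pre.toList.length = length.toNat := by rw [hpreL, List.length_take]; omega
  have hpne : pre.toList ≠ [] := by
    intro h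
    rw [h] at hplen
    simp at hplen
    omega
  have hinvpre := hinv pre.toList hpne
  rw [String.ofList_toList] at hinvpre
  rw [Bool.eq_iff_iff]
  constructor
  · intro hL
    obtain ⟨n, hn, heq⟩ := List.mem_map.mp (List.contains_iff_mem.mp hL)
    obtain ⟨hnn, hne⟩ := List.mem_filter.mp hn
    have hne' : n ≠ name := by simpa using hne
    cases hget : d.get? n with
    | none =>
      exfalso
      have hnil : (PySem.Str.slice (d.getD n "") none (some length)).toList = [] := by
        rw [PySem.Str.toList_slice, PySem.Chars.slice_eq_listSlice, PySem.List.slice_to _ h0L]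
        simp [PySem.Dict.getD, hget]
      rw [heq] at hnil
      exact hpne hnil
    | some v =>
      have hgd : d.getD n "" = v := by simp [PySem.Dict.getD, hget]
      have htake : v.toList.take length.toNat = pre.toList := by
        have h := congrArg String.toList heq
        rw [hgd] at h
        rw [← h, PySem.Str.toList_slice, PySem.Chars.slice_eq_listSlice,
          PySem.List.slice_to _ h0L]
      have hprefix : pre.toList <+: v.toList := (gusn_take_eq_iff hplen).mp htake
      have hitem : (n, v) ∈ d.items := PySem.Dict.mem_items_of_get?_eq_some d hget
      have hitem' : (n, v) ∈ (d.erase name).items := by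
        simp only [PySem.Dict.erase, List.mem_filter]
        exact ⟨hitem, by simpa using hne'⟩
      have hpos : 0 < gusnCnt (d.erase name) pre.toList :=
        List.countP_pos_iff.mpr ⟨(n, v), hitem', by simpa using hprefix⟩
      apply (gusn_contains_iff_get? pfx' pre).mpr
      rw [hinvpre]
      simp [gusnEnc]
      omega
  · intro hR
    have hget : pfx'.get? pre ≠ none := (gusn_contains_iff_get? pfx' pre).mp hR
    have hpos : gusnCnt (d.erase name) pre.toList ≠ 0 := by
      intro h0
      rw [hinvpre, h0] at hget
      simp [gusnEnc] at hget
    obtain ⟨⟨n, v⟩, hkv, hp⟩ := List.countP_pos_iff.mp (Nat.pos_of_ne_zero hpos)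
    have hprefix : pre.toList <+: v.toList := by simpa using hp
    simp only [PySem.Dict.erase, List.mem_filter] at hkv
    have hne' : n ≠ name := by simpa using hkv.2
    have hget? : d.get? n = some v := PySem.Dict.get?_of_mem_items d hkv.1 hnd
    apply List.contains_iff_mem.mpr
    apply List.mem_map.mpr
    refine ⟨n, List.mem_filter.mpr ⟨hkeys (n, v) hkv.1, by simpa using hne'⟩, ?_⟩
    have hgd : d.getD n "" = v := by simp [PySem.Dict.getD, hget?]
    rw [hgd]
    have hlists : (PySem.Str.slice v none (some length)).toList = pre.toList := by
      rw [PySem.Str.toList_slice, PySem.Chars.slice_eq_listSlice, PySem.List.slice_to _ h0L]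
      exact (gusn_take_eq_iff hplen).mpr hprefix
    have := congrArg String.ofList hlists
    simpa [String.ofList_toList] using this

-- the counter after the (conditional) removal loop is exact for d.erase name
theorem gusn_pfx'_inv (d : PySem.Dict String String) (pfx : PySem.Dict String Int) (name : String)
    (hnd : d.keys.Nodup) (hinv : gusnInv d pfx) :
    gusnInv (d.erase name)
      (if d.contains name then gusnRemove [] (d.getD name "").toList pfx else pfx) := by
  by_cases hc : d.contains name
  · rw [if_pos hc]
    have hget : d.get? name ≠ none := (gusn_contains_iff_get? d name).mp hc
    obtain ⟨old, hold⟩ := Option.ne_none_iff_exists'.mp hget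
    have hgd : d.getD name "" = old := by simp [PySem.Dict.getD, hold]
    rw [hgd]
    intro q hq
    have hrem := gusnRemove_spec old.toList [] pfx (gusnCnt d)
      (fun r hr => by simpa [String.ofList_toList] using hinv r hr) q hq
    rw [hrem]
    have hcntE := gusn_countP_erase d name old
      (fun kv => decide (q <+: kv.2.toList)) hnd hold
    have hcond : ([] <+: q ∧ q <+: [] ++ old.toList ∧ q ≠ []) ↔ q <+: old.toList := by
      simp [List.nil_prefix, hq]
    rw [if_congr hcond rfl rfl]
    unfold gusnCnt at *
    by_cases hqo : q <+: old.toList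
    · rw [if_pos hqo]
      simp [hqo] at hcntE
      congr 1
      omega
    · rw [if_neg hqo]
      simp [hqo] at hcntE
      congr 1
  · rw [if_neg hc]
    intro q hq
    rw [hinv q hq]
    unfold gusnCnt
    rw [gusn_items_erase_of_not_contains d (by simpa using hc)]

-- A's inner loop = insert of B's found candidate
theorem gusn_loopA_eq (names : List String) (max_len : Int) (d : PySem.Dict String String)
    (pfx' : PySem.Dict String Int) (name : String)
    (hnd : d.keys.Nodup) (hkeys : ∀ kv ∈ d.items, kv.1 ∈ names)
    (hinv : gusnInv (d.erase name) pfx') :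
    ∀ lens : List Int, (∀ L ∈ lens, 3 ≤ L ∧ L ≤ (name.toList.length : Int)) →
    gusnLoopA names max_len d name lens
      = d.insert name
          (match gusnFind pfx' name max_len lens with
           | some c => c
           | none => PySem.Str.slice name none (some max_len)) := by
  intro lens
  induction lens with
  | nil => intro _; simp [gusnLoopA, gusnFind]
  | cons L rest ih =>
    intro hb
    obtain ⟨h3, hle⟩ := hb L (List.mem_cons_self)
    have htest := gusn_test_eq names d pfx' name L h3 hle hnd hkeys hinv
    simp only [gusnLoopA, gusnFind, htest]
    by_cases hcont : pfx'.contains (PySem.Str.slice name none (some L)) = false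
    · rw [if_pos hcont, if_pos hcont]
    · rw [if_neg hcont, if_neg hcont]
      exact ih (fun L' hL' => hb L' (List.mem_cons_of_mem L hL'))

-- the counter after the addition loop is exact for the updated short dict
theorem gusn_inv_step (d : PySem.Dict String String) (pfx' : PySem.Dict String Int)
    (name chosen : String) (hnd : d.keys.Nodup) (hinv : gusnInv (d.erase name) pfx') :
    gusnInv (d.insert name chosen) (gusnAdd [] chosen.toList pfx') := by
  intro q hq
  have hadd := gusnAdd_spec chosen.toList [] pfx' (gusnCnt (d.erase name))
    (fun r hr => by simpa [String.ofList_toList] using hinv r hr) q hq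
  rw [hadd]
  have hcond : ([] <+: q ∧ q <+: [] ++ chosen.toList ∧ q ≠ []) ↔ q <+: chosen.toList := by
    simp [List.nil_prefix, hq]
  rw [if_congr hcond rfl rfl]
  have hcntI := gusn_countP_insert d name chosen (fun kv => decide (q <+: kv.2.toList)) hnd
  unfold gusnCnt at *
  by_cases hqc : q <+: chosen.toList
  · rw [if_pos hqc]
    simp [hqc] at hcntI
    congr 1
    omega
  · rw [if_neg hqc]
    simp [hqc] at hcntI
    congr 1
    omega

-- one step of both main loops agree and preserve the invariants
theorem gusn_step_eq (names : List String) (max_len : Int) (d : PySem.Dict String String)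
    (pfx : PySem.Dict String Int) (name : String) (hname : name ∈ names)
    (hnd : d.keys.Nodup) (hkeys : ∀ kv ∈ d.items, kv.1 ∈ names) (hinv : gusnInv d pfx) :
    gusnLoopA names max_len d name (PySem.List.pyRange 3 (PySem.Str.len name + 1) 1)
        = (gusnStep max_len (d, pfx) name).1
    ∧ (gusnStep max_len (d, pfx) name).1.keys.Nodup
    ∧ (∀ kv ∈ (gusnStep max_len (d, pfx) name).1.items, kv.1 ∈ names)
    ∧ gusnInv (gusnStep max_len (d, pfx) name).1 (gusnStep max_len (d, pfx) name).2 := by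
  have hinv' := gusn_pfx'_inv d pfx name hnd hinv
  have hbounds : ∀ L ∈ PySem.List.pyRange 3 (PySem.Str.len name + 1) 1,
      3 ≤ L ∧ L ≤ (name.toList.length : Int) := by
    intro L hL
    have := PySem.List.mem_pyRange_one.mp hL
    simp only [PySem.Str.len] at this
    omega
  refine ⟨?_, ?_, ?_, ?_⟩
  · rw [gusn_loopA_eq names max_len d _ name hnd hkeys hinv' _ hbounds]
    rfl
  · exact gusn_nodup_keys_insert d name _ hnd
  · intro kv hkv
    by_cases hc : d.contains name
    · rw [show (gusnStep max_len (d, pfx) name).1 = d.insert name _ from rfl] at hkv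
      rw [PySem.Dict.items_insert_of_contains d _ hc] at hkv
      obtain ⟨p, hp, hpe⟩ := List.mem_map.mp hkv
      by_cases hpk : p.1 = name
      · rw [if_pos (by simp [hpk])] at hpe
        rw [← hpe]
        exact hname
      · rw [if_neg (by simp [hpk])] at hpe
        rw [← hpe]
        exact hkeys p hp
    · rw [show (gusnStep max_len (d, pfx) name).1 = d.insert name _ from rfl] at hkv
      rw [PySem.Dict.items_insert_of_not_contains d _ (by simpa using hc)] at hkv
      rcases List.mem_append.mp hkv with h | h
      · exact hkeys kv h
      · rw [List.mem_singleton] at h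
        rw [h]
        exact hname
  · exact gusn_inv_step d _ name _ hnd hinv'

-- the two main loops agree
theorem gusn_fold_eq (names : List String) (max_len : Int) : ∀ (rest : List String)
    (d : PySem.Dict String String) (pfx : PySem.Dict String Int),
    d.keys.Nodup → (∀ kv ∈ d.items, kv.1 ∈ names) → gusnInv d pfx →
    (∀ n ∈ rest, n ∈ names) →
    rest.foldl
        (fun shortD name =>
          gusnLoopA names max_len shortD name (PySem.List.pyRange 3 (PySem.Str.len name + 1) 1)) d
      = (rest.foldl (gusnStep max_len) (d, pfx)).1 := by
  intro rest
  induction rest with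
  | nil => intro d pfx _ _ _ _; rfl
  | cons n rest ih =>
    intro d pfx hnd hkeys hinv hmem
    obtain ⟨heq, hnd', hkeys', hinv'⟩ :=
      gusn_step_eq names max_len d pfx n (hmem n List.mem_cons_self) hnd hkeys hinv
    simp only [List.foldl_cons]
    rw [heq]
    have := ih (gusnStep max_len (d, pfx) n).1 (gusnStep max_len (d, pfx) n).2 hnd' hkeys' hinv'
      (fun m hm => hmem m (List.mem_cons_of_mem n hm))
    simpa using this

-- ===== VERDICT (by name: the statement is the Claim_ definition above) =====
theorem get_unique_short_names_spec : Claim_equal_get_unique_short_names := by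
  intro names max_len _dom
  unfold Spec_get_unique_short_names get_unique_short_names get_unique_short_names_alt
  have h := gusn_fold_eq names max_len names (PySem.Dict.mk []) (PySem.Dict.mk [])
    (by simp [PySem.Dict.keys]) (by simp) (by intro q _hq; rfl) (by intro n hn; exact hn)
  rw [h]
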